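-- pv_equiv track=rewrite | github.com/3t13nn3/tOoLs | main.py | tRaNsFoRm
-- ===== SOURCE A (Python) =====
-- def tRaNsFoRm(og_text):
-- 	text = list("".join(og_text))
-- 	for i in range(len(text)):
-- 		if i & 0x01:
-- 			text[i] = text[i].upper()
-- 		else:
-- 			text[i] = text[i].lower()
--
-- 	return "".join(text)
-- ===== SOURCE B (Python) =====
-- def tRaNsFoRm(og_text):
--     s = "".join(og_text)
--     evens = [c.lower() for c in s[::2]]
--     odds = [c.upper() for c in s[1::2]]
--     merged = []
--     for e, o in zip(evens, odds):
--         merged.append(e)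
--         merged.append(o)
--     if len(evens) > len(odds):
--         merged.append(evens[-1])
--     return "".join(merged)
-- ===== Notes on version B (the rewrite author's own statement) =====
-- stated objective: alternative
-- what changed: Instead of mutating a char list in place with an index loop testing i & 1, B splits the string into even- and odd-position slices, lowercases/uppercases each in its own comprehension, and re-interleaves them with zip plus an odd-length tail.
import Mathlib
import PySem

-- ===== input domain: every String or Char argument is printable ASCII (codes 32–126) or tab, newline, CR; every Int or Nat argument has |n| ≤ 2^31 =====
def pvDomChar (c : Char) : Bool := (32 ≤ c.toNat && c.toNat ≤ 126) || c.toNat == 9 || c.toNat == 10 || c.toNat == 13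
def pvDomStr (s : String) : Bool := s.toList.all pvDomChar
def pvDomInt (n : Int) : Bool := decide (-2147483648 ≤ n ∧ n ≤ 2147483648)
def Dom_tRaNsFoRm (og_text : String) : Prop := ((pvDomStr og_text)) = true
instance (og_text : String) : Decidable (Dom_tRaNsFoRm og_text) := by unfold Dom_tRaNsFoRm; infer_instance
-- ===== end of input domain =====

-- B alternates case by splitting into even/odd position slices, case-mapping each, and re-interleaving; A mutates an indexed list in place. Same O(n) cost, different decomposition.

-- ===== PORT A =====
-- for i in range(len(text)): text[i] = text[i].upper() if i & 1 else text[i].lower()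
def tRaNsFoRm (og_text : String) : String :=
  let text := og_text.toList
  let text :=
    (PySem.List.pyRange 0 (text.length : Int) 1).foldl
      (fun t i =>
        if Int.land i 1 ≠ 0 then
          t.set i.toNat (PySem.Chars.upperChar (PySem.List.pyGetD t i ' '))
        else
          t.set i.toNat (PySem.Chars.lowerChar (PySem.List.pyGetD t i ' ')))
      text
  String.mk text

-- ===== PORT B =====
-- hand port of the step-2 slice s[::2] (PySem has no stepped slice): exact for step 2 from offset 0
def pvEverySecond : List Char → List Char
  | [] => []
  | [c] => [c]
  | c :: _ :: cs => c :: pvEverySecond cs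

-- 'for e, o in zip(evens, odds): merged += [e, o]'
def pvZipMerge : List Char → List Char → List Char
  | e :: es, o :: os => e :: o :: pvZipMerge es os
  | _, _ => []

def tRaNsFoRm_alt (og_text : String) : String :=
  let s := og_text.toList
  let evens := (pvEverySecond s).map PySem.Chars.lowerChar
  let odds := (pvEverySecond s.tail).map PySem.Chars.upperChar
  let merged := pvZipMerge evens odds
  let merged := if evens.length > odds.length then merged ++ [evens.getLast!] else merged
  String.mk merged

-- ===== PRECONDITION & SPEC =====
def Spec_tRaNsFoRm (og_text : String) (out : String) : Prop := out = tRaNsFoRm_alt og_text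
instance (og_text : String) (out : String) : Decidable (Spec_tRaNsFoRm og_text out) := by unfold Spec_tRaNsFoRm; infer_instance

-- ===== CLAIM (what is proved, stated in full; the proofs are below) =====
def Claim_equal_tRaNsFoRm : Prop := ∀ (og_text : String), Dom_tRaNsFoRm og_text → Spec_tRaNsFoRm og_text (tRaNsFoRm og_text)

-- ===== LEMMAS AND PROOFS =====

-- the common specification: character at index i is uppercased iff i is odd
def pvG (i : Nat) (c : Char) : Char :=
  if i % 2 = 1 then PySem.Chars.upperChar c else PySem.Chars.lowerChar c

lemma pvG_shift (cs : List Char) :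
    cs.mapIdx (fun i c => pvG (i + 1 + 1) c) = cs.mapIdx pvG := by
  have h : (fun i c => pvG (i + 1 + 1) c) = pvG := by
    funext i c
    have h2 : (i + 1 + 1) % 2 = i % 2 := by omega
    simp [pvG, h2]
  rw [h]

lemma pvEverySecond_cons (c : Char) (l : List Char) :
    pvEverySecond (c :: l) = c :: pvEverySecond l.tail := by
  cases l <;> simp [pvEverySecond]

lemma pvGetLast!_cons (a : Char) (l : List Char) (h : l ≠ []) :
    (a :: l).getLast! = l.getLast! := by
  obtain ⟨x, hx⟩ := Option.isSome_iff_exists.mp (List.getLast?_isSome.mpr h)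
  simp [List.getLast?_cons, hx]

lemma pvAlt_core (s : List Char) :
    (let evens := (pvEverySecond s).map PySem.Chars.lowerChar
     let odds := (pvEverySecond s.tail).map PySem.Chars.upperChar
     let merged := pvZipMerge evens odds
     if evens.length > odds.length then merged ++ [evens.getLast!] else merged)
    = s.mapIdx pvG := by
  induction s using pvEverySecond.induct with
  | case1 => simp [pvEverySecond, pvZipMerge]
  | case2 c => simp [pvEverySecond, pvZipMerge, pvG]
  | case3 c1 c2 cs ih =>
    simp only [pvEverySecond, List.tail_cons, pvEverySecond_cons, List.map_cons,
      pvZipMerge, List.length_cons, gt_iff_lt, Nat.add_lt_add_iff_right,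
      List.mapIdx_cons, pvG_shift] at ih ⊢
    by_cases h : (List.map PySem.Chars.upperChar (pvEverySecond cs.tail)).length <
        (List.map PySem.Chars.lowerChar (pvEverySecond cs)).length
    · have hne : List.map PySem.Chars.lowerChar (pvEverySecond cs) ≠ [] := by
        intro h0; rw [h0] at h; simp at h
      rw [if_pos h] at ih ⊢
      rw [pvGetLast!_cons _ _ hne, List.cons_append, List.cons_append, ih]
      simp [pvG]
    · rw [if_neg h] at ih ⊢
      rw [ih]
      simp [pvG]

lemma pvFoldA (s : List Char) : ∀ (k : Nat), k ≤ s.length →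
    (PySem.List.pyRange 0 (k : Int) 1).foldl
      (fun t i =>
        if Int.land i 1 ≠ 0 then
          t.set i.toNat (PySem.Chars.upperChar (PySem.List.pyGetD t i ' '))
        else
          t.set i.toNat (PySem.Chars.lowerChar (PySem.List.pyGetD t i ' ')))
      s
    = (s.take k).mapIdx pvG ++ s.drop k := by
  intro k hk
  induction k with
  | zero => simp [PySem.List.pyRange_one_eq_nil]
  | succ k ihk =>
    have hk' : k ≤ s.length := Nat.le_of_succ_le hk
    have hks : k < s.length := hk
    have hcast : ((k + 1 : Nat) : Int) = (k : Int) + 1 := by push_cast; ring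
    rw [hcast, PySem.List.pyRange_one_succ_right (by positivity), List.foldl_append,
      ihk hk']
    have hlen : ((s.take k).mapIdx pvG).length = k := by
      simp [List.length_take, Nat.min_eq_left hk']
    have hget : PySem.List.pyGetD ((s.take k).mapIdx pvG ++ s.drop k) (k : Int) ' ' = s[k] := by
      rw [PySem.List.pyGetD_eq_getElem _ _ (by positivity) (by simp [hlen]; omega)]
      simp only [Int.toNat_natCast]
      rw [List.getElem_append_right (by omega)]
      simp [hlen]
    have hland : Int.land (k : Int) 1 = ((k % 2 : Nat) : Int) := by
      rw [show ((k : Nat) : Int) = Int.ofNat k from rfl, show (1 : Int) = Int.ofNat 1 from rfl]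
      simp [Int.land, Nat.and_one_is_mod]
    have hset : ∀ v : Char, ((s.take k).mapIdx pvG ++ s.drop k).set k v
        = (s.take k).mapIdx pvG ++ (v :: s.drop (k + 1)) := by
      intro v
      rw [List.set_append_right _ _ (by omega), hlen, Nat.sub_self,
        List.drop_eq_getElem_cons hks, List.set_cons_zero]
    have htake : (s.take (k + 1)).mapIdx pvG = (s.take k).mapIdx pvG ++ [pvG k s[k]] := by
      rw [List.take_succ, List.getElem?_eq_getElem hks]
      simp only [Option.toList_some]
      rw [List.mapIdx_append_one, List.length_take, Nat.min_eq_left hk']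
    simp only [List.foldl_cons, List.foldl_nil, hget, Int.toNat_natCast, hland]
    by_cases hpar : k % 2 = 1
    · rw [if_pos (by omega), hset, htake]
      rw [show pvG k s[k] = PySem.Chars.upperChar s[k] from if_pos hpar]
      simp
    · rw [if_neg (by omega), hset, htake]
      rw [show pvG k s[k] = PySem.Chars.lowerChar s[k] from if_neg hpar]
      simp

-- ===== VERDICT (by name: the statement is the Claim_ definition above) =====
theorem tRaNsFoRm_spec : Claim_equal_tRaNsFoRm := by
  intro og _
  unfold Spec_tRaNsFoRm tRaNsFoRm tRaNsFoRm_alt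
  simp only
  rw [pvFoldA og.toList og.toList.length le_rfl, pvAlt_core og.toList]
  rw [List.take_length, List.drop_length, List.append_nil]
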